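-- pv_equiv track=rewrite | github.com/mykyta-krainik/page-rank-with-dangling-nodes-handling | main.py | remove_dangling_nodes
-- ===== SOURCE A (Python) =====
-- def remove_dangling_nodes(graph):
--     while True:
--         dangling_nodes = [node for node in graph if len(graph[node]) == 0]
--
--         if not dangling_nodes:
--             break
--
--         for node in dangling_nodes:
--             del graph[node]
--
--         for node in graph:
--             graph[node] = [neighbor for neighbor in graph[node] if neighbor in graph]
--
--     return graph
-- ===== SOURCE B (Python) =====
-- def remove_dangling_nodes(graph):
--     # Maintain only the set of live nodes against the frozen adjacency; rebuild the dict once at the end.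
--     live = {k for k, v in graph.items() if v}
--     if len(live) == len(graph):
--         return graph
--     while True:
--         new_live = {k for k in live if any(n in live for n in graph[k])}
--         if len(new_live) == len(live):
--             break
--         live = new_live
--     result = {k: [n for n in v if n in live] for k, v in graph.items() if k in live}
--     graph.clear()
--     graph.update(result)
--     return graph
-- ===== Notes on version B (the rewrite author's own statement) =====
-- stated objective: alternative
-- what changed: A repeatedly mutates the dict itself (deleting dangling entries and rewriting every adjacency list each round); B instead maintains only a set of live nodes against the frozen original adjacency, shrinks that set to its fixpoint, and rebuilds the dict in a single final pass.
import Mathlib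
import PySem

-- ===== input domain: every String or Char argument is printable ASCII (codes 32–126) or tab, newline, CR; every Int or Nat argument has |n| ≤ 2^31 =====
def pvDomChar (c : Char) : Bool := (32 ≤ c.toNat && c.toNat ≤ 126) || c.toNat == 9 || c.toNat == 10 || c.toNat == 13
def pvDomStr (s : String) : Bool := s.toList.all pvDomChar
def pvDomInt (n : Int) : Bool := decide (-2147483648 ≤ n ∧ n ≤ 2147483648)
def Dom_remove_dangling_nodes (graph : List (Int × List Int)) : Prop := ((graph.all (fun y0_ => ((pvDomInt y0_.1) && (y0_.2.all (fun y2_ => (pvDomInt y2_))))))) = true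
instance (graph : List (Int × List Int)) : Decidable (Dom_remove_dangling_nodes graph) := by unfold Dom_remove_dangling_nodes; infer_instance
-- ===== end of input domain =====

-- B keeps only a set of live nodes against the frozen adjacency and rebuilds the dict once,
-- instead of A's per-round dict mutation that deletes entries and rewrites every list each round.
-- A mutates its argument in place (my Python B reproduces that side effect); the theorems here are about the return value.

-- ===== PORT A =====
-- The Python dict is the association list (unique keys under Pre_); graph[k] is first-match lookup.
def pvAdj (g : List (Int × List Int)) (k : Int) : List Int :=
  (g.find? (fun kv => kv.1 == k)).elim [] (fun kv => kv.2)

-- while True: … ; fuel graph.length + 1 is enough because every non-final round deletes ≥ 1 node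
def pvALoop : Nat → List (Int × List Int) → List (Int × List Int)
  | 0, g => g
  | fuel+1, g =>
    -- dangling_nodes = [node for node in graph if len(graph[node]) == 0]
    let dangling := (g.map (fun kv => kv.1)).filter (fun k => (pvAdj g k).length == 0)
    if dangling = [] then g
    else
      -- for node in dangling_nodes: del graph[node]
      let g1 := dangling.foldl (fun d k => d.eraseP (fun kv => kv.1 == k)) g
      -- for node in graph: graph[node] = [n for n in graph[node] if n in graph]  (keys never change here)
      let g2 := g1.map (fun kv => (kv.1, kv.2.filter (fun n => g1.any (fun kv' => kv'.1 == n))))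
      pvALoop fuel g2

def remove_dangling_nodes (graph : List (Int × List Int)) : List (Int × List Int) :=
  pvALoop (graph.length + 1) graph

-- ===== PORT B =====
-- while True: new_live = {k for k in live if any(n in live for n in graph[k])} …
-- live is a Python set, kept here as the nodup list of live keys in original key order
-- (B only tests membership, takes len and filters by it, never iterates the set's order into the result)
def pvBLive (graph : List (Int × List Int)) (live : List Int) : List Int :=
  if h : (live.filter (fun k => (pvAdj graph k).any (fun n => live.contains n))).length = live.length
  then live
  else pvBLive graph (live.filter (fun k => (pvAdj graph k).any (fun n => live.contains n)))
termination_by live.length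
decreasing_by
  have hlt : (live.filter (fun k => (pvAdj graph k).any fun n => live.contains n)).length < live.length :=
    lt_of_le_of_ne (List.length_filter_le _ _) h
  simpa using hlt

def remove_dangling_nodes_alt (graph : List (Int × List Int)) : List (Int × List Int) :=
  -- live = {k for k, v in graph.items() if v}
  let live0 := PySem.Set.ofList ((graph.filter (fun kv => !kv.2.isEmpty)).map (fun kv => kv.1))
  if live0.length = graph.length then graph
  else
    let live := pvBLive graph live0
    -- result = {k: [n for n in v if n in live] for k, v in graph.items() if k in live}
    (graph.filter (fun kv => live.contains kv.1)).map
      (fun kv => (kv.1, kv.2.filter (fun n => live.contains n)))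

-- ===== PRECONDITION & SPEC =====
-- Pre_ only states that the association list represents a Python dict: keys are distinct.
-- A duplicate-key list does not arise from any dict input, so nothing is excluded that Python A returns on.
def Pre_remove_dangling_nodes (graph : List (Int × List Int)) : Prop :=
  (graph.map Prod.fst).Nodup

instance (graph : List (Int × List Int)) : Decidable (Pre_remove_dangling_nodes graph) := by
  unfold Pre_remove_dangling_nodes; infer_instance

def pvWitness_remove_dangling_nodes : (List (Int × List Int)) :=
  [(1, [2, 5]), (2, []), (3, [1])]

def Spec_remove_dangling_nodes (graph : List (Int × List Int)) (out : List (Int × List Int)) : Prop := out = remove_dangling_nodes_alt graph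
instance (graph : List (Int × List Int)) (out : List (Int × List Int)) : Decidable (Spec_remove_dangling_nodes graph out) := by unfold Spec_remove_dangling_nodes; infer_instance

-- ===== CLAIM (what is proved, stated in full; the proofs are below) =====
def Claim_equal_remove_dangling_nodes : Prop := ∀ (graph : List (Int × List Int)), Dom_remove_dangling_nodes graph → Pre_remove_dangling_nodes graph → Spec_remove_dangling_nodes graph (remove_dangling_nodes graph)

-- ===== LEMMAS AND PROOFS =====

-- proof-only abbreviations
def pvKeys (g : List (Int × List Int)) : List Int := g.map (fun kv => kv.1)

-- the dict A holds after any completed removal round: original entries restricted to the live keys,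
-- adjacency lists filtered to the live keys
def pvState (g : List (Int × List Int)) (L : List Int) : List (Int × List Int) :=
  (g.filter (fun kv => L.contains kv.1)).map (fun kv => (kv.1, kv.2.filter (fun n => L.contains n)))

theorem keys_filter (g : List (Int × List Int)) (pr : Int × List Int → Bool) (p : Int → Bool)
    (h : ∀ kv ∈ g, pr kv = p kv.1) : pvKeys (g.filter pr) = (pvKeys g).filter p := by
  induction g with
  | nil => rfl
  | cons kv g ih =>
    have hh := h kv (List.mem_cons_self ..)
    have ihh := ih (fun kv hkv => h kv (List.mem_cons_of_mem _ hkv))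
    by_cases hp : p kv.1
    · rw [List.filter_cons_of_pos (hh ▸ hp)]
      simp only [pvKeys, List.map_cons] at *
      rw [List.filter_cons_of_pos hp, ihh]
    · rw [List.filter_cons_of_neg (by simp [hh, hp])]
      simp only [pvKeys, List.map_cons] at *
      rw [List.filter_cons_of_neg (by simp [hp]), ihh]

theorem nodup_keys_filter (g : List (Int × List Int)) (pr : Int × List Int → Bool)
    (hnd : (pvKeys g).Nodup) : (pvKeys (g.filter pr)).Nodup := by
  have h1 : (g.filter pr).Sublist g := List.filter_sublist ..
  unfold pvKeys at hnd ⊢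
  exact (h1.map (fun kv => kv.1)).nodup hnd

theorem pvAdj_cons (kv : Int × List Int) (g : List (Int × List Int)) (k : Int) :
    pvAdj (kv :: g) k = if kv.1 == k then kv.2 else pvAdj g k := by
  by_cases h : kv.1 == k <;> simp [pvAdj, List.find?_cons, h]

theorem pvAdj_of_mem (g : List (Int × List Int)) (k : Int) (v : List Int)
    (hnd : (pvKeys g).Nodup) (h : (k, v) ∈ g) : pvAdj g k = v := by
  induction g with
  | nil => cases h
  | cons kv g ih =>
    simp only [pvKeys, List.map_cons, List.nodup_cons] at hnd
    rcases List.mem_cons.1 h with h1 | h1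
    · subst h1; simp [pvAdj_cons]
    · have hne : kv.1 ≠ k := by
        intro he; exact hnd.1 (he ▸ (List.mem_map.2 ⟨(k, v), h1, rfl⟩))
      rw [pvAdj_cons, if_neg (by simpa using hne)]
      exact ih hnd.2 h1

theorem pvAdj_state (g : List (Int × List Int)) (L : List Int) (k : Int) :
    pvAdj (pvState g L) k =
      if L.contains k then (pvAdj g k).filter (fun n => L.contains n) else [] := by
  induction g with
  | nil => simp [pvState, pvAdj]
  | cons kv g ih =>
    simp only [pvState, List.filter_cons] at *
    by_cases hm : L.contains kv.1
    · rw [if_pos hm, List.map_cons]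
      by_cases he : kv.1 == k
      · have hk : L.contains k = true := by rw [← eq_of_beq he]; exact hm
        rw [pvAdj_cons, pvAdj_cons]
        simp only [he, if_pos]
        rw [if_pos hk]
      · rw [pvAdj_cons, pvAdj_cons]
        simp only [he, if_neg, Bool.false_eq_true, ite_false]
        exact ih
    · rw [if_neg hm]
      by_cases he : kv.1 == k
      · have hk : L.contains k = false := by rw [← eq_of_beq he]; simpa using hm
        rw [ih, pvAdj_cons, hk]
        simp
      · rw [ih, pvAdj_cons]
        simp only [he, Bool.false_eq_true, ite_false]

theorem len_eq_zero_not_any (v : List Int) (c : Int → Bool) :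
    ((v.filter c).length == 0) = !(v.any c) := by
  by_cases h : v.any c
  · rcases List.any_eq_true.1 h with ⟨a, ha, hc⟩
    have hne : v.filter c ≠ [] := List.ne_nil_of_mem (List.mem_filter.2 ⟨ha, hc⟩)
    have hlen : (v.filter c).length ≠ 0 := by
      intro h0; exact hne (List.length_eq_zero_iff.1 h0)
    simp [h, hlen]
  · have hnil : v.filter c = [] :=
      List.filter_eq_nil_iff.2 (fun a ha hc => h (List.any_eq_true.2 ⟨a, ha, hc⟩))
    simp [h, hnil]

theorem eraseP_key_nodup (g : List (Int × List Int)) (k : Int) (hnd : (pvKeys g).Nodup) :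
    g.eraseP (fun kv => kv.1 == k) = g.filter (fun kv => !(kv.1 == k)) := by
  induction g with
  | nil => rfl
  | cons kv g ih =>
    simp only [pvKeys, List.map_cons, List.nodup_cons] at hnd
    by_cases he : kv.1 == k
    · rw [List.eraseP_cons, he, List.filter_cons_of_neg (by simp [he])]
      simp only [cond_true]
      have : ∀ kv' ∈ g, (!(kv'.1 == k)) = true := by
        intro kv' h1
        have : kv'.1 ≠ kv.1 := by
          intro hx; exact hnd.1 (hx ▸ (List.mem_map.2 ⟨kv', h1, rfl⟩))
        simp [eq_of_beq he ▸ this]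
      exact (List.filter_eq_self.2 this).symm
    · rw [List.eraseP_cons, List.filter_cons_of_pos (by simpa using he), ih hnd.2]
      have : (kv.1 == k) = false := by simpa using he
      simp [this]

theorem foldl_eraseP_filter (ds : List Int) :
    ∀ g : List (Int × List Int), (pvKeys g).Nodup →
    ds.foldl (fun d k => d.eraseP (fun kv => kv.1 == k)) g =
      g.filter (fun kv => !(ds.contains kv.1)) := by
  induction ds with
  | nil => intro g _; simp
  | cons d ds ih =>
    intro g hnd
    rw [List.foldl_cons, eraseP_key_nodup g d hnd]
    have hnd' : (pvKeys (g.filter (fun kv => !(kv.1 == d)))).Nodup :=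
      nodup_keys_filter g _ hnd
    rw [ih _ hnd', List.filter_filter]
    apply List.filter_congr
    intro kv _
    by_cases h1 : kv.1 = d <;> by_cases h2 : ds.contains kv.1 <;> simp [h1, h2]

theorem ofList_nodup_eq (xs : List Int) (h : xs.Nodup) : PySem.Set.ofList xs = xs := by
  have aux : ∀ (ys acc : List Int), (acc ++ ys).Nodup → ys.foldl PySem.Set.add acc = acc ++ ys := by
    intro ys
    induction ys with
    | nil => intro acc _; simp
    | cons y ys ih =>
      intro acc hacc
      have hy : acc.contains y = false := by
        rcases h2 : acc.contains y with _ | _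
        · rfl
        · exfalso
          have hmem : y ∈ acc := by simpa using h2
          have hd := List.disjoint_of_nodup_append hacc
          exact hd hmem (List.mem_cons_self ..)
      have hy' : y ∉ acc := by simpa using hy
      have hadd : PySem.Set.add acc y = acc ++ [y] := by
        simp [PySem.Set.add, hy']
      rw [List.foldl_cons, hadd, ih (acc ++ [y]) (by simpa using hacc)]
      simp
  have := aux xs [] (by simpa using h)
  simpa [PySem.Set.ofList_eq_foldl] using this

-- definitional unfoldings of the two loops and of B's top level
theorem pvALoop_succ (f : Nat) (g : List (Int × List Int)) :
    pvALoop (f + 1) g =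
      (if ((g.map (fun kv => kv.1)).filter (fun k => ((pvAdj g k).length == 0))) = [] then g
       else
        pvALoop f
          (((((g.map (fun kv => kv.1)).filter (fun k => ((pvAdj g k).length == 0))).foldl
                (fun d k => d.eraseP (fun kv => kv.1 == k)) g)).map
            (fun kv =>
              (kv.1,
                kv.2.filter (fun n =>
                  (((g.map (fun kv => kv.1)).filter (fun k => ((pvAdj g k).length == 0))).foldl
                      (fun d k => d.eraseP (fun kv => kv.1 == k)) g).any
                    (fun kv' => kv'.1 == n)))))) := rfl

theorem pvBLive_eq (graph : List (Int × List Int)) (live : List Int) :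
    pvBLive graph live =
      if (live.filter (fun k => (pvAdj graph k).any (fun n => live.contains n))).length = live.length
      then live
      else pvBLive graph (live.filter (fun k => (pvAdj graph k).any (fun n => live.contains n))) := by
  rw [pvBLive]
  split <;> rfl

theorem alt_eq (graph : List (Int × List Int)) :
    remove_dangling_nodes_alt graph =
      if (PySem.Set.ofList ((graph.filter (fun kv => !kv.2.isEmpty)).map (fun kv => kv.1))).length
          = graph.length then graph
      else
        ((graph.filter (fun kv =>
            (pvBLive graph (PySem.Set.ofList
              ((graph.filter (fun kv => !kv.2.isEmpty)).map (fun kv => kv.1)))).contains kv.1)).map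
          (fun kv => (kv.1, kv.2.filter (fun n =>
            (pvBLive graph (PySem.Set.ofList
              ((graph.filter (fun kv => !kv.2.isEmpty)).map (fun kv => kv.1)))).contains n)))) := rfl

-- two Boolean identities used pointwise inside filters
theorem contains_filter (l : List Int) (pr : Int → Bool) (x : Int) :
    (l.filter pr).contains x = (l.contains x && pr x) := by
  by_cases h1 : x ∈ l <;> by_cases h2 : pr x = true <;>
    simp [List.mem_filter, h1, h2]

theorem bool_key (A B : Bool) : (!(A && !B) && A) = (A && B) := by
  cases A <;> cases B <;> rfl

-- A's loop on a state equals B's live-set loop (live sets written as keys0.filter p)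
theorem pvLoop_eq (g0 : List (Int × List Int)) (hnd : (pvKeys g0).Nodup) :
    ∀ (fuel : Nat) (p : Int → Bool), ((pvKeys g0).filter p).length < fuel →
    pvALoop fuel (pvState g0 ((pvKeys g0).filter p)) =
      pvState g0 (pvBLive g0 ((pvKeys g0).filter p)) := by
  intro fuel
  induction fuel with
  | zero => intro p hp; omega
  | succ f ih =>
    intro p hp
    have hLnd : ((pvKeys g0).filter p).Nodup := hnd.filter _
    -- keys of the state are exactly the live keys
    have hkeysSt : pvKeys (pvState g0 ((pvKeys g0).filter p)) = (pvKeys g0).filter p := by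
      rw [pvState]
      have h1 : pvKeys ((g0.filter (fun kv => ((pvKeys g0).filter p).contains kv.1)).map
          (fun kv => (kv.1, kv.2.filter (fun n => ((pvKeys g0).filter p).contains n)))) =
          pvKeys (g0.filter (fun kv => ((pvKeys g0).filter p).contains kv.1)) := by
        simp [pvKeys, List.map_map, Function.comp_def]
      rw [h1, keys_filter g0 _ (fun k => ((pvKeys g0).filter p).contains k) (fun kv _ => rfl)]
      apply List.filter_congr
      intro k hk
      by_cases hpk : p k <;> simp [List.mem_filter, hk, hpk]
    -- the dangling nodes of this round
    have hdang : ((pvState g0 ((pvKeys g0).filter p)).map (fun kv => kv.1)).filter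
        (fun k => ((pvAdj (pvState g0 ((pvKeys g0).filter p)) k).length == 0)) =
        ((pvKeys g0).filter p).filter
          (fun k => !((pvAdj g0 k).any (fun n => ((pvKeys g0).filter p).contains n))) := by
      rw [show ((pvState g0 ((pvKeys g0).filter p)).map (fun kv => kv.1))
            = pvKeys (pvState g0 ((pvKeys g0).filter p)) from rfl, hkeysSt]
      apply List.filter_congr
      intro k hk
      have hkL : ((pvKeys g0).filter p).contains k = true := by simpa using hk
      rw [pvAdj_state, hkL]
      simp only [if_true]
      exact len_eq_zero_not_any _ _
    rw [pvALoop_succ, hdang, pvBLive_eq]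
    by_cases hall : ∀ k ∈ (pvKeys g0).filter p,
        (pvAdj g0 k).any (fun n => ((pvKeys g0).filter p).contains n) = true
    · -- fixpoint reached: both loops stop
      have hdnil : ((pvKeys g0).filter p).filter
          (fun k => !((pvAdj g0 k).any (fun n => ((pvKeys g0).filter p).contains n))) = [] :=
        List.filter_eq_nil_iff.2 (fun a ha h2 => by rw [hall a ha] at h2; simp at h2)
      have hfself : ((pvKeys g0).filter p).filter
          (fun k => (pvAdj g0 k).any (fun n => ((pvKeys g0).filter p).contains n))
          = (pvKeys g0).filter p := List.filter_eq_self.2 hall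
      rw [hdnil, if_pos rfl, hfself, if_pos rfl]
    · -- the round removes at least one node; both loops recurse
      rcases not_forall.1 hall with ⟨a, ha⟩
      rcases _root_.not_imp.1 ha with ⟨haL, hqa⟩
      have hqa' : (pvAdj g0 a).any (fun n => ((pvKeys g0).filter p).contains n) = false := by
        simpa using hqa
      have hdne : ((pvKeys g0).filter p).filter
          (fun k => !((pvAdj g0 k).any (fun n => ((pvKeys g0).filter p).contains n))) ≠ [] :=
        List.ne_nil_of_mem (List.mem_filter.2 ⟨haL, by rw [hqa']; rfl⟩)
      have hlt : (((pvKeys g0).filter p).filter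
          (fun k => (pvAdj g0 k).any (fun n => ((pvKeys g0).filter p).contains n))).length
          < ((pvKeys g0).filter p).length := by
        refine lt_of_le_of_ne (List.length_filter_le _ _) ?_
        intro heq
        have := List.length_filter_eq_length_iff.1 heq a haL
        rw [hqa'] at this
        cases this
      rw [if_neg hdne, if_neg (by omega)]
      -- A's erase loop deletes exactly the dangling entries
      have hndSt : (pvKeys (pvState g0 ((pvKeys g0).filter p))).Nodup := by
        rw [hkeysSt]; exact hLnd
      rw [foldl_eraseP_filter
        (((pvKeys g0).filter p).filter
          (fun k => !((pvAdj g0 k).any (fun n => ((pvKeys g0).filter p).contains n))))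
        (pvState g0 ((pvKeys g0).filter p)) hndSt]
      -- push the key filter through the value map
      have hpush : (pvState g0 ((pvKeys g0).filter p)).filter (fun kv =>
          !((((pvKeys g0).filter p).filter
            (fun k => !((pvAdj g0 k).any (fun n => ((pvKeys g0).filter p).contains n)))).contains kv.1)) =
          (g0.filter (fun kv => (((pvKeys g0).filter p).filter
            (fun k => (pvAdj g0 k).any (fun n => ((pvKeys g0).filter p).contains n))).contains kv.1)).map
            (fun kv => (kv.1, kv.2.filter (fun n => ((pvKeys g0).filter p).contains n))) := by
        rw [pvState, List.filter_map]
        have hkeyfun : ((fun kv : Int × List Int =>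
            !((((pvKeys g0).filter p).filter
              (fun k => !((pvAdj g0 k).any (fun n => ((pvKeys g0).filter p).contains n)))).contains kv.1))
            ∘ (fun kv : Int × List Int => (kv.1, kv.2.filter (fun n => ((pvKeys g0).filter p).contains n))))
            = fun kv : Int × List Int =>
              !((((pvKeys g0).filter p).filter
                (fun k => !((pvAdj g0 k).any (fun n => ((pvKeys g0).filter p).contains n)))).contains kv.1) := rfl
        rw [hkeyfun, List.filter_filter]
        congr 1
        apply List.filter_congr
        intro kv _
        have h1 := contains_filter ((pvKeys g0).filter p)
          (fun k => !((pvAdj g0 k).any (fun n => ((pvKeys g0).filter p).contains n))) kv.1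
        have h2 := contains_filter ((pvKeys g0).filter p)
          (fun k => (pvAdj g0 k).any (fun n => ((pvKeys g0).filter p).contains n)) kv.1
        simp only [h1, h2]
        exact bool_key _ _
      rw [hpush]
      -- the membership test of the rebuild loop is membership in the new live set
      have hany : (fun n => ((g0.filter (fun kv => (((pvKeys g0).filter p).filter
            (fun k => (pvAdj g0 k).any (fun n => ((pvKeys g0).filter p).contains n))).contains kv.1)).map
            (fun kv => (kv.1, kv.2.filter (fun n => ((pvKeys g0).filter p).contains n)))).any
            (fun kv' => kv'.1 == n)) =
          (fun n => (((pvKeys g0).filter p).filter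
            (fun k => (pvAdj g0 k).any (fun n => ((pvKeys g0).filter p).contains n))).contains n) := by
        funext n
        by_cases hn : n ∈ ((pvKeys g0).filter p).filter
            (fun k => (pvAdj g0 k).any (fun n => ((pvKeys g0).filter p).contains n))
        · have hnk : n ∈ pvKeys g0 := (List.mem_filter.1 (List.mem_filter.1 hn).1).1
          rcases List.mem_map.1 hnk with ⟨kv, hkv, hkv1⟩
          have hmm : (kv.1, kv.2.filter (fun m => ((pvKeys g0).filter p).contains m)) ∈
              (g0.filter (fun kv => (((pvKeys g0).filter p).filter
                (fun k => (pvAdj g0 k).any (fun n => ((pvKeys g0).filter p).contains n))).contains kv.1)).map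
              (fun kv => (kv.1, kv.2.filter (fun n => ((pvKeys g0).filter p).contains n))) :=
            List.mem_map.2 ⟨kv, List.mem_filter.2 ⟨hkv, by rw [hkv1]; simpa using hn⟩, rfl⟩
          have hc : (((pvKeys g0).filter p).filter
              (fun k => (pvAdj g0 k).any (fun n => ((pvKeys g0).filter p).contains n))).contains n
              = true := by simpa using hn
          rw [List.any_eq_true.2 ⟨_, hmm, by simpa using hkv1⟩, hc]
        · have hfalse : ∀ kv' ∈ (g0.filter (fun kv => (((pvKeys g0).filter p).filter
              (fun k => (pvAdj g0 k).any (fun n => ((pvKeys g0).filter p).contains n))).contains kv.1)).map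
              (fun kv => (kv.1, kv.2.filter (fun n => ((pvKeys g0).filter p).contains n))),
              ¬ (kv'.1 == n) = true := by
            intro kv' hkv' hc
            rcases List.mem_map.1 hkv' with ⟨kv, hkv, rfl⟩
            have hin := (List.mem_filter.1 hkv).2
            have hmem : kv.1 ∈ ((pvKeys g0).filter p).filter
                (fun k => (pvAdj g0 k).any (fun n => ((pvKeys g0).filter p).contains n)) := by
              simpa using hin
            have hbe : kv.1 = n := by simpa using hc
            exact hn (hbe ▸ hmem)
          have hc : (((pvKeys g0).filter p).filter
              (fun k => (pvAdj g0 k).any (fun n => ((pvKeys g0).filter p).contains n))).contains n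
              = false := by simpa using hn
          rw [List.any_eq_false.2 hfalse, hc]
      rw [hany]
      -- the second value filter collapses onto the new live set
      have hvalfun : ((fun kv : Int × List Int => (kv.1, kv.2.filter (fun n =>
            (((pvKeys g0).filter p).filter
              (fun k => (pvAdj g0 k).any (fun n => ((pvKeys g0).filter p).contains n))).contains n)))
          ∘ (fun kv : Int × List Int => (kv.1, kv.2.filter (fun n => ((pvKeys g0).filter p).contains n))))
          = fun kv : Int × List Int => (kv.1, kv.2.filter (fun n =>
            (((pvKeys g0).filter p).filter
              (fun k => (pvAdj g0 k).any (fun n => ((pvKeys g0).filter p).contains n))).contains n)) := by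
        funext kv
        simp only [Function.comp_apply, List.filter_filter]
        refine congrArg (fun v => (kv.1, v)) ?_
        apply List.filter_congr
        intro n _
        have h2 := contains_filter (pvKeys g0)
          (fun a => ((pvAdj g0 a).any fun n => ((pvKeys g0).filter p).contains n) && p a) n
        have h3 := contains_filter (pvKeys g0) p n
        simp only [h2, h3]
        cases hb1 : (pvKeys g0).contains n <;>
          cases hb2 : p n <;>
          cases hb3 : ((pvAdj g0 n).any fun m => ((pvKeys g0).filter p).contains m) <;>
          simp [hb1, hb2, hb3]
      rw [List.map_map, hvalfun]
      have hlen : (((pvKeys g0).filter p).filter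
          (fun k => (pvAdj g0 k).any (fun n => ((pvKeys g0).filter p).contains n))).length < f := by
        omega
      rw [List.filter_filter] at hlen
      have hih := ih _ hlen
      rw [← List.filter_filter] at hih
      exact hih

theorem main_equiv (g : List (Int × List Int)) (hnd : (pvKeys g).Nodup) :
    remove_dangling_nodes g = remove_dangling_nodes_alt g := by
  have hvals : ∀ kv ∈ g, pvAdj g kv.1 = kv.2 := by
    intro kv hkv
    exact pvAdj_of_mem g kv.1 kv.2 hnd (by simpa using hkv)
  have hset : PySem.Set.ofList ((g.filter (fun kv => !kv.2.isEmpty)).map (fun kv => kv.1))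
      = (pvKeys g).filter (fun k => !((pvAdj g k).length == 0)) := by
    have h1 : pvKeys (g.filter (fun kv => !kv.2.isEmpty))
        = (pvKeys g).filter (fun k => !((pvAdj g k).length == 0)) := by
      refine keys_filter g _ _ ?_
      intro kv hkv
      rw [hvals kv hkv]
      cases kv.2 <;> rfl
    calc PySem.Set.ofList ((g.filter (fun kv => !kv.2.isEmpty)).map (fun kv => kv.1))
        = PySem.Set.ofList (pvKeys (g.filter (fun kv => !kv.2.isEmpty))) := rfl
      _ = PySem.Set.ofList ((pvKeys g).filter (fun k => !((pvAdj g k).length == 0))) := by rw [h1]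
      _ = (pvKeys g).filter (fun k => !((pvAdj g k).length == 0)) :=
          ofList_nodup_eq _ (hnd.filter _)
  rw [alt_eq, hset]
  rw [show remove_dangling_nodes g = pvALoop (g.length + 1) g from rfl]
  rw [pvALoop_succ]
  rw [show (g.map (fun kv => kv.1)) = pvKeys g from rfl]
  by_cases hall0 : ∀ k ∈ pvKeys g, ((pvAdj g k).length == 0) = false
  · have hdnil : (pvKeys g).filter (fun k => ((pvAdj g k).length == 0)) = [] :=
      List.filter_eq_nil_iff.2 (fun a ha h2 => by rw [hall0 a ha] at h2; cases h2)
    have hfull : (pvKeys g).filter (fun k => !((pvAdj g k).length == 0)) = pvKeys g :=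
      List.filter_eq_self.2 (fun a ha => by rw [hall0 a ha]; rfl)
    rw [hdnil, hfull, if_pos rfl, if_pos (by simp [pvKeys])]
  · rcases not_forall.1 hall0 with ⟨a, ha⟩
    rcases _root_.not_imp.1 ha with ⟨haK, hae⟩
    have hae' : ((pvAdj g a).length == 0) = true := by
      rcases h2 : ((pvAdj g a).length == 0) with _ | _
      · exact absurd h2 hae
      · rfl
    have hdne : (pvKeys g).filter (fun k => ((pvAdj g k).length == 0)) ≠ [] :=
      List.ne_nil_of_mem (List.mem_filter.2 ⟨haK, hae'⟩)
    have hltg : ((pvKeys g).filter (fun k => !((pvAdj g k).length == 0))).length < g.length := by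
      have h1 := List.length_filter_le (fun k => !((pvAdj g k).length == 0)) (pvKeys g)
      have h2 : ((pvKeys g).filter (fun k => !((pvAdj g k).length == 0))).length
          ≠ (pvKeys g).length := by
        intro heq
        have := List.length_filter_eq_length_iff.1 heq a haK
        rw [hae'] at this
        cases this
      have h3 : (pvKeys g).length = g.length := by simp [pvKeys]
      omega
    rw [if_neg hdne, if_neg (by omega)]
    rw [foldl_eraseP_filter ((pvKeys g).filter (fun k => ((pvAdj g k).length == 0))) g hnd]
    have hkeyc : g.filter (fun kv =>
        !(((pvKeys g).filter (fun k => ((pvAdj g k).length == 0))).contains kv.1))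
        = g.filter (fun kv =>
          ((pvKeys g).filter (fun k => !((pvAdj g k).length == 0))).contains kv.1) := by
      apply List.filter_congr
      intro kv hkv
      have hk1 : (pvKeys g).contains kv.1 = true := by
        simpa [pvKeys] using (List.mem_map.2 ⟨kv, hkv, rfl⟩ : kv.1 ∈ pvKeys g)
      have h1 := contains_filter (pvKeys g) (fun k => ((pvAdj g k).length == 0)) kv.1
      have h2 := contains_filter (pvKeys g) (fun k => !((pvAdj g k).length == 0)) kv.1
      simp only [h1, h2, hk1]
      cases hE : ((pvAdj g kv.1).length == 0) <;> simp [hE]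
    rw [hkeyc]
    have hany0 : (fun n => (g.filter (fun kv =>
          ((pvKeys g).filter (fun k => !((pvAdj g k).length == 0))).contains kv.1)).any
          (fun kv' => kv'.1 == n))
        = (fun n => ((pvKeys g).filter (fun k => !((pvAdj g k).length == 0))).contains n) := by
      funext n
      by_cases hn : n ∈ (pvKeys g).filter (fun k => !((pvAdj g k).length == 0))
      · rcases List.mem_map.1 ((List.mem_filter.1 hn).1) with ⟨kv, hkv, hkv1⟩
        have hc : ((pvKeys g).filter (fun k => !((pvAdj g k).length == 0))).contains n
            = true := by simpa using hn
        rw [List.any_eq_true.2 ⟨kv, List.mem_filter.2 ⟨hkv, by rw [hkv1]; simpa using hn⟩,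
          by simpa using hkv1⟩, hc]
      · have hfalse : ∀ kv' ∈ g.filter (fun kv =>
            ((pvKeys g).filter (fun k => !((pvAdj g k).length == 0))).contains kv.1),
            ¬ (kv'.1 == n) = true := by
          intro kv' hkv' hc
          have hin := (List.mem_filter.1 hkv').2
          have hmem : kv'.1 ∈ (pvKeys g).filter (fun k => !((pvAdj g k).length == 0)) := by
            simpa using hin
          have hbe : kv'.1 = n := by simpa using hc
          exact hn (hbe ▸ hmem)
        have hc : ((pvKeys g).filter (fun k => !((pvAdj g k).length == 0))).contains n
            = false := by simpa using hn
        rw [List.any_eq_false.2 hfalse, hc]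
    rw [hany0]
    exact pvLoop_eq g hnd g.length _ (by omega)

-- ===== VERDICT (by name: the statement is the Claim_ definition above) =====
theorem remove_dangling_nodes_spec : Claim_equal_remove_dangling_nodes := by
  unfold Claim_equal_remove_dangling_nodes
  intro g _ hpre
  unfold Spec_remove_dangling_nodes
  exact main_equiv g hpre
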